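-- pv_equiv track=rewrite | github.com/autoreleasefool/advent-of-code | 2015/day_11/python/day11.py | increment_by_one
-- ===== SOURCE A (Python) =====
-- def increment_by_one(position, password):
--     # Move the letter at position up by 1
--     # If the letter is 'z', make it 'a' and increment the previous letter
--     # Skip the letters 'i', 'o' and 'l'
--     if password[position] == "z":
--         password[position] = "a"
--         increment_by_one(position - 1, password)
--     else:
--         password[position] = chr(ord(password[position]) + 1)
--         if password[position] in {"i", "o", "l"}:
--             password[position] = chr(ord(password[position]) + 1)
--     return password
-- ===== SOURCE B (Python) =====
-- def increment_by_one(position, password):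
--     # Iterative carry loop instead of recursion: walk left while the letter is 'z'.
--     while password[position] == "z":
--         password[position] = "a"
--         position -= 1
--     c = chr(ord(password[position]) + 1)
--     password[position] = chr(ord(c) + 1) if c in "iol" else c
--     return password
-- ===== Notes on version B (the rewrite author's own statement) =====
-- stated objective: alternative
-- what changed: Replaced A's recursive carry (function calls itself with position-1 while the letter is 'z') by an iterative while-loop that performs the carry in place and then does the single increment-and-skip step once at the end; same cost, different decomposition.
import Mathlib
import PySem

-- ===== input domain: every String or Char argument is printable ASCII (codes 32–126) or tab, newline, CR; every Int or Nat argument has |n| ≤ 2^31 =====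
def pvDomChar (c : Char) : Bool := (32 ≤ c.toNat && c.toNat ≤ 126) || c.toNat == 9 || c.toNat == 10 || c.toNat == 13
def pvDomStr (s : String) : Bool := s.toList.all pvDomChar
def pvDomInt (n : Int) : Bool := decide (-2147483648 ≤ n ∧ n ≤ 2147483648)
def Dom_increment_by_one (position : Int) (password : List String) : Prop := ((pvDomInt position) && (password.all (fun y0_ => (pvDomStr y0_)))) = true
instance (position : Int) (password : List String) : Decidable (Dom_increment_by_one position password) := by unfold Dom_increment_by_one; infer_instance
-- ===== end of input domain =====

-- B replaces A's carry recursion by an iterative while-loop decomposition (carry loop, then one increment step); same values, same cost.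
-- Both versions mutate `password` in place in Python (identically); the theorems below are about the returned list.

-- chr(n) (both Pythons build one-character strings this way)
def pvChr (n : Nat) : String := String.ofList [Char.ofNat n]

-- ord(s): some code point for a one-character string, none = TypeError
def pvOrd? (s : String) : Option Nat :=
  match s.toList with
  | [c] => some c.toNat
  | _ => none

-- termination measure fact, cited by both ports' decreasing_by
theorem pv_count_decrease {xs : List String} {i : Int}
    (h : PySem.List.pyGet? xs i = some "z") :
    (PySem.List.pySetD xs i "a").count "z" < xs.count "z" := by
  unfold PySem.List.pyGet? at h
  cases hk : PySem.List.pyIdx? xs.length i with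
  | none => rw [hk] at h; simp at h
  | some k =>
    rw [hk] at h
    simp only [Option.bind_some] at h
    have hlt : k < xs.length := by
      by_contra hge
      rw [List.getElem?_eq_none (by omega)] at h
      simp at h
    have hget : xs[k] = "z" := by
      have := List.getElem?_eq_some_iff.mp h
      exact this.choose_spec
    unfold PySem.List.pySetD PySem.List.pySet?
    rw [hk]
    simp only [Option.map_some, Option.getD_some]
    rw [List.count_set hlt]
    simp [hget]
    exact hget ▸ List.getElem_mem hlt

-- ===== PORT A =====
def increment_by_one (position : Int) (password : List String) : List String :=
  match h : PySem.List.pyGet? password position with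
  | none => password            -- IndexError in Python (outside Pre_)
  | some c =>
    if hz : c = "z" then
      increment_by_one (position - 1) (PySem.List.pySetD password position "a")
    else
      match pvOrd? c with
      | none => password        -- TypeError in Python (outside Pre_)
      | some o =>
        let pw1 := PySem.List.pySetD password position (pvChr (o + 1))
        let c1 := PySem.List.pyGetD pw1 position ""
        if c1 = "i" ∨ c1 = "o" ∨ c1 = "l" then
          match pvOrd? c1 with
          | none => pw1
          | some o1 => PySem.List.pySetD pw1 position (pvChr (o1 + 1))
        else pw1
termination_by password.count "z"
decreasing_by exact pv_count_decrease (hz ▸ h)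

-- ===== PORT B =====
-- the `while password[position] == "z"` loop: returns the final (position, password)
def pvCarry (position : Int) (password : List String) : Int × List String :=
  if h : PySem.List.pyGet? password position = some "z" then
    pvCarry (position - 1) (PySem.List.pySetD password position "a")
  else (position, password)
termination_by password.count "z"
decreasing_by exact pv_count_decrease h

def increment_by_one_alt (position : Int) (password : List String) : List String :=
  let r := pvCarry position password
  match PySem.List.pyGet? r.2 r.1 with
  | none => r.2                 -- IndexError in Python (outside Pre_)
  | some s =>
    match pvOrd? s with
    | none => r.2               -- TypeError in Python (outside Pre_)
    | some o =>
      let c := pvChr (o + 1)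
      let newc :=
        if c = "i" ∨ c = "o" ∨ c = "l" then
          match pvOrd? c with
          | some o2 => pvChr (o2 + 1)
          | none => c
        else c
      PySem.List.pySetD r.2 r.1 newc

-- ===== PRECONDITION & SPEC =====
-- the cyclic left scan of indices that the carry visits, starting from `position`
def pvScan (position : Int) (n : Nat) : List Nat :=
  let i0 : Nat := (if 0 ≤ position then position else position + n).toNat
  (List.range (i0 + 1)).reverse ++
    (if 0 ≤ position then (List.range' (i0 + 1) (n - (i0 + 1))).reverse else [])

-- Pre_ = exactly the inputs where Python A returns: position a valid (possibly negative) index, and the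
-- first non-"z" along the leftward carry scan is a one-character string (if the whole scan is "z",
-- position must be nonnegative so that the wraparound reaches an already-rewritten "a" instead of IndexError).
def Pre_increment_by_one (position : Int) (password : List String) : Prop :=
  ((decide (PySem.Raise.InRange password.length position)) &&
   (match (pvScan position password.length).find? (fun j => password.getD j "" != "z") with
    | some j => (password.getD j "").toList.length == 1
    | none => decide (0 ≤ position))) = true
instance (position : Int) (password : List String) : Decidable (Pre_increment_by_one position password) := by
  unfold Pre_increment_by_one; infer_instance

def pvWitness_increment_by_one : Int × List String := (0, ["a"])

def Spec_increment_by_one (position : Int) (password : List String) (out : List String) : Prop := out = increment_by_one_alt position password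
instance (position : Int) (password : List String) (out : List String) : Decidable (Spec_increment_by_one position password out) := by unfold Spec_increment_by_one; infer_instance

-- ===== CLAIM (what is proved, stated in full; the proofs are below) =====
def Claim_equal_increment_by_one : Prop := ∀ (position : Int) (password : List String), Dom_increment_by_one position password → Pre_increment_by_one position password → Spec_increment_by_one position password (increment_by_one position password)

-- ===== LEMMAS AND PROOFS =====

theorem pv_idx_of_get {α : Type} {xs : List α} {i : Int} {c : α}
    (h : PySem.List.pyGet? xs i = some c) :
    ∃ k, PySem.List.pyIdx? xs.length i = some k ∧ k < xs.length ∧ xs[k]? = some c := by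
  unfold PySem.List.pyGet? at h
  cases hk : PySem.List.pyIdx? xs.length i with
  | none => rw [hk] at h; simp at h
  | some k =>
    rw [hk] at h
    simp only [Option.bind_some] at h
    refine ⟨k, rfl, ?_, h⟩
    by_contra hge
    rw [List.getElem?_eq_none (by omega)] at h
    simp at h

theorem pv_setD_eq {α : Type} {xs : List α} {i : Int} {k : Nat}
    (hk : PySem.List.pyIdx? xs.length i = some k) (v : α) :
    PySem.List.pySetD xs i v = xs.set k v := by
  unfold PySem.List.pySetD PySem.List.pySet?
  rw [hk]; rfl

theorem pv_getD_setD {α : Type} {xs : List α} {i : Int} {k : Nat}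
    (hk : PySem.List.pyIdx? xs.length i = some k) (hlt : k < xs.length) (v d : α) :
    PySem.List.pyGetD (PySem.List.pySetD xs i v) i d = v := by
  rw [pv_setD_eq hk v]
  unfold PySem.List.pyGetD PySem.List.pyGet?
  rw [List.length_set, hk]
  simp [hlt]

theorem pv_setD_setD {α : Type} {xs : List α} {i : Int} {k : Nat}
    (hk : PySem.List.pyIdx? xs.length i = some k) (v w : α) :
    PySem.List.pySetD (PySem.List.pySetD xs i v) i w = PySem.List.pySetD xs i w := by
  rw [pv_setD_eq hk v]
  have hk2 : PySem.List.pyIdx? (xs.set k v).length i = some k := by rw [List.length_set]; exact hk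
  rw [pv_setD_eq hk2 w, pv_setD_eq hk w, List.set_set]

-- one step of B's while loop
theorem pv_alt_step {position : Int} {password : List String}
    (h : PySem.List.pyGet? password position = some "z") :
    increment_by_one_alt position password
      = increment_by_one_alt (position - 1) (PySem.List.pySetD password position "a") := by
  unfold increment_by_one_alt
  rw [pvCarry]
  simp [h]

theorem pv_AB : ∀ (n : Nat) (position : Int) (password : List String),
    password.count "z" = n →
    increment_by_one position password = increment_by_one_alt position password := by
  intro n
  induction n using Nat.strong_induction_on with
  | _ n ih =>
    intro position password hn
    rw [increment_by_one]
    cases hg : PySem.List.pyGet? password position with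
    | none =>
      unfold increment_by_one_alt
      rw [pvCarry]
      simp [hg]
    | some c =>
      by_cases hz : c = "z"
      · subst hz
        rw [pv_alt_step hg]
        exact ih _ (hn ▸ pv_count_decrease hg) _ _ rfl
      · simp only [dif_neg hz]
        obtain ⟨k, hk, hlt, -⟩ := pv_idx_of_get hg
        unfold increment_by_one_alt
        rw [pvCarry]
        have hne : ¬ PySem.List.pyGet? password position = some "z" := by
          rw [hg]; exact fun hc => hz (Option.some.inj hc)
        simp only [dif_neg hne]
        cases ho : pvOrd? c with
        | none => simp [hg, ho]
        | some o =>
          simp only [hg, ho]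
          rw [pv_getD_setD hk hlt (pvChr (o + 1)) ""]
          by_cases hiol : pvChr (o + 1) = "i" ∨ pvChr (o + 1) = "o" ∨ pvChr (o + 1) = "l"
          · simp only [if_pos hiol]
            have hord : pvOrd? (pvChr (o + 1)) = some ((Char.ofNat (o + 1)).toNat) := by
              simp [pvOrd?, pvChr]
            rw [hord]
            exact pv_setD_setD hk _ _
          · simp [if_neg hiol]

-- ===== VERDICT (by name: the statement is the Claim_ definition above) =====
theorem increment_by_one_spec : Claim_equal_increment_by_one := by
  intro position password _ _
  unfold Spec_increment_by_one
  exact pv_AB _ position password rfl
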